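-- pv_equiv track=rewrite | github.com/OlliPeltomaa/cse24 | app.py | trade
-- ===== SOURCE A (Python) =====
-- def trade(quantity,orders):
--     """
--     Returns information about how given orders should be changed
--     if matching order is placed with given quantity.
--
--     Args:
--         quantity (int): How many offers or bids is to be matched.
--         orders (list of tuples): List of bids or offers. One order is tuple: (id,orderer_id,price,quantity)
--
--     Returns:
--         orders_to_be_removed: list of order id:s, bids or offers with corresponding id should be removed
--         orders_to_be_updated: list of tuples, where tuple=(order_id,new_price), these orders should be updated to new price
--         trades_to_be_created: list of tuples where (orderer_id,trade_price,trade_quantity), these trades should be created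
--         quantities_left:      int of how many orders left unmatched.
--     """
--     trade_quantity = 0
--     trade_price = 0
--     quantities_left = quantity
--     i = 0
--     orders_to_be_removed = []
--     orders_to_be_updated = []
--     trades_to_be_created = []
--     while (i < len(orders) and 0 < quantities_left):
--         best_order = orders[i]
--         order_id = best_order[0]
--         orderer_id = best_order[1]
--         trade_price = best_order[2]
--         order_quantity = best_order[3]
--         trade_quantity = order_quantity
--         if (quantities_left < order_quantity):
--             orders_left = order_quantity-quantities_left
--             orders_to_be_updated.append((order_id,orders_left))
--             trade_quantity = quantities_left
--             quantities_left = 0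
--         else:
--             orders_to_be_removed.append(order_id)
--             quantities_left-=order_quantity
--         trades_to_be_created.append((orderer_id,trade_price,trade_quantity))
--         i+=1
--     return orders_to_be_removed, orders_to_be_updated, trades_to_be_created, quantities_left
-- ===== SOURCE B (Python) =====
-- def trade(quantity, orders):
--     # Annotate each order with the cumulative quantity before it, find the
--     # split point, then build all outputs from the prefix by comprehensions.
--     total = 0
--     annotated = []
--     for o in orders:
--         annotated.append((total, o))
--         total += o[3]
--     k = 0
--     hit = None
--     stop = total
--     for before, o in annotated:
--         if before >= quantity:
--             stop = before
--             break
--         if before + o[3] > quantity: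
--             hit = (before, o)
--             break
--         k += 1
--     removed = [o[0] for _, o in annotated[:k]]
--     trades = [(o[1], o[2], o[3]) for _, o in annotated[:k]]
--     if hit is not None:
--         before, (oid, orderer, price, q) = hit
--         consumed = quantity - before
--         return removed, [(oid, q - consumed)], trades + [(orderer, price, consumed)], 0
--     return removed, [], trades, quantity - stop
-- ===== Notes on version B (the rewrite author's own statement) =====
-- stated objective: alternative
-- what changed: A accumulates all four outputs inside one while loop; B first annotates each order with the cumulative quantity before it (a prefix-sum pass), then finds the split point, and builds the removed/trade lists by comprehensions over the prefix slice, handling the partial order separately.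
import Mathlib
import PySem

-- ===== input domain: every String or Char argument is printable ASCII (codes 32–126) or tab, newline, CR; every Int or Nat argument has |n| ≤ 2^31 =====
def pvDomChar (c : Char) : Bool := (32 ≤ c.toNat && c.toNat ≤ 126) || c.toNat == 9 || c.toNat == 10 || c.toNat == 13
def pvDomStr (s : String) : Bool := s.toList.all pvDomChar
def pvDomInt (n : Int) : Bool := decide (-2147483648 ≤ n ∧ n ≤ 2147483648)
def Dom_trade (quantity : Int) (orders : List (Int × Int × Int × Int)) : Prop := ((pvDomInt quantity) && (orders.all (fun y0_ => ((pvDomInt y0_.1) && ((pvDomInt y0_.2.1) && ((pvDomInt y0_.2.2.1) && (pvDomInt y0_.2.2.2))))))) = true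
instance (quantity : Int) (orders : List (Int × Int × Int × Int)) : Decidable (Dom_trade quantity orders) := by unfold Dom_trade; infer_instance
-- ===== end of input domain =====

-- B replaces A's single loop carrying four result accumulators by a prefix-sum
-- annotation, a split-point search, and output lists built from the prefix
-- (objective: alternative decomposition; equivalence of the RETURN value is proved).

-- ===== PORT A =====
-- A's while loop: structural recursion over the remaining orders, carrying
-- quantities_left and the three result accumulators (appending, as Python does).
def tradeLoop (qleft : Int) (orders : List (Int × Int × Int × Int))
    (rem : List Int) (upd : List (Int × Int)) (tr : List (Int × Int × Int)) :
    List Int × (List (Int × Int)) × (List (Int × Int × Int)) × Int :=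
  match orders with
  | [] => (rem, upd, tr, qleft)
  | (oid, orderer, price, q) :: rest =>
    if 0 < qleft then
      if qleft < q then
        -- partial match: update order, create partial trade, quantities_left = 0,
        -- loop condition then fails
        (rem, upd ++ [(oid, q - qleft)], tr ++ [(orderer, price, qleft)], 0)
      else
        tradeLoop (qleft - q) rest (rem ++ [oid]) upd (tr ++ [(orderer, price, q)])
    else (rem, upd, tr, qleft)

def trade (quantity : Int) (orders : List (Int × Int × Int × Int)) : List Int × (List (Int × Int)) × (List (Int × Int × Int)) × Int :=
  tradeLoop quantity orders [] [] []

-- ===== PORT B =====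
-- Source B's second loop: scan the annotated list for the split point, counting k.
def scanSplit (quantity total : Int) (k : Nat) :
    List (Int × (Int × Int × Int × Int)) →
    Nat × Option (Int × (Int × Int × Int × Int)) × Int
  | [] => (k, none, total)
  | (before, o) :: rest =>
    if before ≥ quantity then (k, none, before)
    else if before + o.2.2.2 > quantity then (k, some (before, o), total)
    else scanSplit quantity total (k + 1) rest

def trade_alt (quantity : Int) (orders : List (Int × Int × Int × Int)) : List Int × (List (Int × Int)) × (List (Int × Int × Int)) × Int :=
  -- first loop of Source B: annotate each order with the cumulative quantity before it
  let st := orders.foldl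
    (fun (st : Int × List (Int × (Int × Int × Int × Int))) o =>
      (st.1 + o.2.2.2, st.2 ++ [(st.1, o)]))
    ((0 : Int), [])
  let total := st.1
  let annotated := st.2
  let r := scanSplit quantity total 0 annotated
  let k := r.1
  let hit := r.2.1
  let stop := r.2.2
  let removed := (annotated.take k).map (fun p => p.2.1)
  let trades := (annotated.take k).map (fun p => (p.2.2.1, p.2.2.2.1, p.2.2.2.2))
  match hit with
  | some (before, (oid, orderer, price, q)) =>
      (removed, [(oid, q - (quantity - before))], trades ++ [(orderer, price, quantity - before)], 0)
  | none => (removed, [], trades, quantity - stop)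

-- ===== PRECONDITION & SPEC =====
def Spec_trade (quantity : Int) (orders : List (Int × Int × Int × Int)) (out : List Int × (List (Int × Int)) × (List (Int × Int × Int)) × Int) : Prop := out = trade_alt quantity orders
instance (quantity : Int) (orders : List (Int × Int × Int × Int)) (out : List Int × (List (Int × Int)) × (List (Int × Int × Int)) × Int) : Decidable (Spec_trade quantity orders out) := by unfold Spec_trade; infer_instance

-- ===== CLAIM (what is proved, stated in full; the proofs are below) =====
def Claim_equal_trade : Prop := ∀ (quantity : Int) (orders : List (Int × Int × Int × Int)), Dom_trade quantity orders → Spec_trade quantity orders (trade quantity orders)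

-- ===== LEMMAS AND PROOFS =====

-- accumulator-free reference recursion both ports are reduced to
def tradeSimple (qleft : Int) : List (Int × Int × Int × Int) →
    List Int × (List (Int × Int)) × (List (Int × Int × Int)) × Int
  | [] => ([], [], [], qleft)
  | (oid, orderer, price, q) :: rest =>
    if 0 < qleft then
      if qleft < q then ([], [(oid, q - qleft)], [(orderer, price, qleft)], 0)
      else
        let r := tradeSimple (qleft - q) rest
        (oid :: r.1, r.2.1, (orderer, price, q) :: r.2.2.1, r.2.2.2)
    else ([], [], [], qleft)

theorem tradeLoop_acc (orders : List (Int × Int × Int × Int)) :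
    ∀ (qleft : Int) (rem : List Int) (upd : List (Int × Int)) (tr : List (Int × Int × Int)),
    tradeLoop qleft orders rem upd tr =
      ((rem ++ (tradeSimple qleft orders).1,
        upd ++ (tradeSimple qleft orders).2.1,
        tr ++ (tradeSimple qleft orders).2.2.1,
        (tradeSimple qleft orders).2.2.2)) := by
  induction orders with
  | nil => intro qleft rem upd tr; simp [tradeLoop, tradeSimple]
  | cons o rest ih =>
    obtain ⟨oid, orderer, price, q⟩ := o
    intro qleft rem upd tr
    simp only [tradeLoop, tradeSimple]
    by_cases h1 : 0 < qleft
    · by_cases h2 : qleft < q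
      · simp [h1, h2]
      · simp [h1, h2, ih]
    · simp [h1]

def shiftAnn (c : Int) (p : Int × (Int × Int × Int × Int)) : Int × (Int × Int × Int × Int) :=
  (p.1 + c, p.2)

-- reference annotation starting from cumulative 0
def ann0 : List (Int × Int × Int × Int) → List (Int × (Int × Int × Int × Int))
  | [] => []
  | o :: rest => (0, o) :: (ann0 rest).map (shiftAnn o.2.2.2)

def qsum : List (Int × Int × Int × Int) → Int
  | [] => 0
  | o :: rest => o.2.2.2 + qsum rest

theorem map_shift_shift (c d : Int) (l : List (Int × (Int × Int × Int × Int))) :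
    (l.map (shiftAnn d)).map (shiftAnn c) = l.map (shiftAnn (c + d)) := by
  induction l with
  | nil => rfl
  | cons p rest ih => simp [shiftAnn, ih]; ring

theorem annotate_foldl (orders : List (Int × Int × Int × Int)) :
    ∀ (c : Int) (a : List (Int × (Int × Int × Int × Int))),
    orders.foldl
      (fun (st : Int × List (Int × (Int × Int × Int × Int))) o =>
        (st.1 + o.2.2.2, st.2 ++ [(st.1, o)])) (c, a)
      = (c + qsum orders, a ++ (ann0 orders).map (shiftAnn c)) := by
  induction orders with
  | nil => intro c a; simp [qsum, ann0]
  | cons o rest ih =>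
    intro c a
    have h2 : List.map (shiftAnn c) (List.map (shiftAnn o.2.2.2) (ann0 rest))
        = List.map (shiftAnn (c + o.2.2.2)) (ann0 rest) := map_shift_shift c o.2.2.2 (ann0 rest)
    simp only [List.foldl_cons, ih, qsum, ann0, List.map_cons, h2, Prod.mk.injEq]
    refine ⟨by ring, ?_⟩
    simp [shiftAnn]

theorem scanSplit_shift (ann : List (Int × (Int × Int × Int × Int))) :
    ∀ (quantity total c : Int) (k : Nat),
    scanSplit quantity total k (ann.map (shiftAnn c)) =
      ((scanSplit (quantity - c) (total - c) k ann).1,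
       (scanSplit (quantity - c) (total - c) k ann).2.1.map (shiftAnn c),
       (scanSplit (quantity - c) (total - c) k ann).2.2 + c) := by
  induction ann with
  | nil => intro quantity total c k; simp [scanSplit]
  | cons p rest ih =>
    obtain ⟨before, o⟩ := p
    intro quantity total c k
    simp only [List.map_cons, scanSplit, shiftAnn]
    by_cases h1 : before + c ≥ quantity
    · have h1' : before ≥ quantity - c := by omega
      simp [h1, h1']
    · have h1' : ¬ before ≥ quantity - c := by omega
      by_cases h2 : before + c + o.2.2.2 > quantity
      · have h2' : before + o.2.2.2 > quantity - c := by omega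
        simp [h1, h1', h2, h2', shiftAnn]
      · have h2' : ¬ before + o.2.2.2 > quantity - c := by omega
        simp [h1, h1', h2, h2', ih]

theorem scanSplit_k (ann : List (Int × (Int × Int × Int × Int))) :
    ∀ (quantity total : Int) (k : Nat),
    scanSplit quantity total k ann =
      (k + (scanSplit quantity total 0 ann).1,
       (scanSplit quantity total 0 ann).2) := by
  induction ann with
  | nil => intro quantity total k; simp [scanSplit]
  | cons p rest ih =>
    obtain ⟨before, o⟩ := p
    intro quantity total k
    simp only [scanSplit]
    by_cases h1 : before ≥ quantity
    · simp [h1]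
    · by_cases h2 : before + o.2.2.2 > quantity
      · simp [h1, h2]
      · rw [if_neg h1, if_neg h2, if_neg h1, if_neg h2]
        rw [ih _ _ (k + 1), ih _ _ 1]
        simp; omega

theorem ann0_take_map (rest : List (Int × Int × Int × Int)) (c : Int) (k : Nat)
    (f : (Int × (Int × Int × Int × Int)) → α) (g : (Int × (Int × Int × Int × Int)) → α)
    (hfg : ∀ p, f (shiftAnn c p) = g p) :
    (((ann0 rest).map (shiftAnn c)).take k).map f = ((ann0 rest).take k).map g := by
  rw [← List.map_take, List.map_map]
  congr 1; funext p; exact hfg p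

theorem trade_alt_eq_simple (orders : List (Int × Int × Int × Int)) :
    ∀ (quantity : Int), trade_alt quantity orders = tradeSimple quantity orders := by
  induction orders with
  | nil => intro quantity; simp [trade_alt, tradeSimple, scanSplit]
  | cons o rest ih =>
    obtain ⟨oid, orderer, price, q⟩ := o
    intro quantity
    simp only [trade_alt, tradeSimple, List.foldl_cons]
    rw [show ((0:Int) + (oid, orderer, price, q).2.2.2, ([] : List (Int × (Int × Int × Int × Int))) ++ [((0:Int), (oid, orderer, price, q))]) = ((q : Int), [((0:Int), (oid, orderer, price, q))]) by simp]
    rw [annotate_foldl]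
    simp only [List.singleton_append]
    simp only [scanSplit]
    by_cases h1 : (0:Int) ≥ quantity
    · have h1' : ¬ 0 < quantity := by omega
      simp [h1, h1']
    · have h1' : 0 < quantity := by omega
      by_cases h2 : (0:Int) + q > quantity
      · have h2' : quantity < q := by omega
        simp [h1, h1', h2']
      · have h2' : ¬ quantity < q := by omega
        rw [if_neg h1, if_neg h2]
        rw [scanSplit_k, scanSplit_shift]
        have ihq := ih (quantity - q)
        simp only [trade_alt, annotate_foldl, Int.zero_add, List.nil_append] at ihq
        -- rewrite shifted ann0 with lemma; total - q relation
        have htot : q + qsum rest - q = qsum rest := by ring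
        rw [htot] at *
        -- abbreviations
        have hid : shiftAnn 0 = id := funext (fun p => by simp [shiftAnn])
        have hmap0 : (ann0 rest).map (shiftAnn 0) = ann0 rest := by
          rw [hid, List.map_id]
        rw [hmap0] at ihq
        set r := scanSplit (quantity - q) (qsum rest) 0 (ann0 rest) with hr
        -- now compute both sides
        rw [if_pos h1', if_neg h2']
        have hk : 0 + 1 + r.1 = r.1 + 1 := by omega
        rw [hk]
        simp only [List.take_succ_cons, List.map_cons]
        rw [ann0_take_map rest q r.1 (fun p => p.2.1) (fun p => p.2.1) (by intro p; rfl),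
            ann0_take_map rest q r.1 (fun p => (p.2.2.1, p.2.2.2.1, p.2.2.2.2)) (fun p => (p.2.2.1, p.2.2.2.1, p.2.2.2.2)) (by intro p; rfl)]
        rw [← ihq]
        cases hh : r.2.1 with
        | none => simp [hh, shiftAnn]; ring
        | some p =>
          obtain ⟨b', ⟨oid', orderer', price', q'⟩⟩ := p
          simp [hh, shiftAnn]
          ring

-- ===== VERDICT (by name: the statement is the Claim_ definition above) =====
theorem trade_spec : Claim_equal_trade := by
  intro quantity orders _
  unfold Spec_trade trade
  rw [tradeLoop_acc, trade_alt_eq_simple]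
  simp
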